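-- pv_equiv track=rewrite | github.com/Ojhaharsh/10ways2do | src/core/release_snapshot.py | _pick_primary_metric_column
-- ===== SOURCE A (Python) =====
-- from typing import Any, Dict, List
--
-- class ReleaseSnapshotError(ValueError):
--     """Raised when a release snapshot cannot be generated."""
--
-- def _pick_primary_metric_column(columns: List[str]) -> str:
--     candidates = [c for c in columns if c.endswith(" Mean")]
--     if not candidates:
--         raise ReleaseSnapshotError("No primary metric mean column found in canonical comparison")
--
--     preferred = [
--         "NDCG@10 Mean",
--         "F1 Mean",
--         "Overall Exact Match Mean",
--         "MAE Mean",
--     ]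
--     for name in preferred:
--         if name in candidates:
--             return name
--
--     return candidates[0]
-- ===== SOURCE B (Python) =====
-- from typing import List
--
--
-- class ReleaseSnapshotError(ValueError):
--     """Raised when a release snapshot cannot be generated."""
--
--
-- def _pick_primary_metric_column(columns: List[str]) -> str:
--     candidates = [c for c in columns if c.endswith(" Mean")]
--     if not candidates:
--         raise ReleaseSnapshotError("No primary metric mean column found in canonical comparison")
--
--     preferred = [
--         "NDCG@10 Mean",
--         "F1 Mean",
--         "Overall Exact Match Mean",
--         "MAE Mean",
--     ]
--     priority = {name: i for i, name in enumerate(preferred)}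
--     # stable min: first candidate with the lowest priority rank; non-preferred
--     # candidates all tie at len(preferred), so the first candidate is the fallback
--     return min(candidates, key=lambda c: priority.get(c, len(preferred)))
-- ===== Notes on version B (the rewrite author's own statement) =====
-- stated objective: alternative
-- what changed: Instead of scanning the preferred list and testing membership in candidates, B builds a name-to-rank dict and selects the result in one stable min pass over candidates, with non-preferred names tying at len(preferred) so the first candidate is the fallback.
import Mathlib
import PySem

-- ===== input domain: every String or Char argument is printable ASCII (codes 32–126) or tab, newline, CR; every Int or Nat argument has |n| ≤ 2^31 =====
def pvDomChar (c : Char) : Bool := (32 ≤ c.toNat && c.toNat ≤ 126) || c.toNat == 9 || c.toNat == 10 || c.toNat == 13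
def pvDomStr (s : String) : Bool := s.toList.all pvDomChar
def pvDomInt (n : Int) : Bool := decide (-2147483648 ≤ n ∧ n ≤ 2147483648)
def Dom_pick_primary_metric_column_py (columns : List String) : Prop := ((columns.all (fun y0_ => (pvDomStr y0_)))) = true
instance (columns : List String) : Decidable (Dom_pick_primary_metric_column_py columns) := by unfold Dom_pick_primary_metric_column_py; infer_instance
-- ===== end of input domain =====

-- B replaces the scan over the preferred list (membership tests in candidates) by a
-- rank dict and a single stable-min pass over candidates; equivalence of return values
-- is proved on Pre_ (A raises ReleaseSnapshotError when no column ends with " Mean").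

-- ===== PORT A =====
-- the 'for name in preferred: if name in candidates: return name' loop
def pickLoopA (preferred : List String) (candidates : List String) : Option String :=
  match preferred with
  | [] => none
  | n :: rest => if candidates.contains n then some n else pickLoopA rest candidates

def pick_primary_metric_column_py (columns : List String) : String :=
  let candidates := columns.filter (fun c => PySem.Str.endswith c " Mean")
  match candidates with
  | [] => ""  -- Python raises ReleaseSnapshotError here; excluded by Pre_
  | c0 :: _ =>
    (pickLoopA ["NDCG@10 Mean", "F1 Mean", "Overall Exact Match Mean", "MAE Mean"] candidates).getD c0

-- ===== PORT B =====
def pick_primary_metric_column_py_alt (columns : List String) : String :=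
  let candidates := columns.filter (fun c => PySem.Str.endswith c " Mean")
  match candidates with
  | [] => ""  -- Python raises ReleaseSnapshotError here; excluded by Pre_
  | _ :: _ =>
    let preferred := ["NDCG@10 Mean", "F1 Mean", "Overall Exact Match Mean", "MAE Mean"]
    let priority := (PySem.List.enumerate preferred).foldl
      (fun d p => d.insert p.2 p.1) (PySem.Dict.empty : PySem.Dict String Int)
    (PySem.List.min? candidates
      (fun c => priority.getD c ((preferred.length : Int)))).getD ""

-- ===== PRECONDITION & SPEC =====
-- Pre_ excludes exactly the inputs with no column ending in " Mean", where A raises ReleaseSnapshotError.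
def Pre_pick_primary_metric_column_py (columns : List String) : Prop :=
  columns.filter (fun c => PySem.Str.endswith c " Mean") ≠ []
instance (columns : List String) : Decidable (Pre_pick_primary_metric_column_py columns) := by
  unfold Pre_pick_primary_metric_column_py; infer_instance

def pvWitness_pick_primary_metric_column_py : List String := ["Latency", "F1 Mean", "MAE Mean"]

def Spec_pick_primary_metric_column_py (columns : List String) (out : String) : Prop :=
  out = pick_primary_metric_column_py_alt columns
instance (columns : List String) (out : String) : Decidable (Spec_pick_primary_metric_column_py columns out) := by
  unfold Spec_pick_primary_metric_column_py; infer_instance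

-- ===== CLAIM (what is proved, stated in full; the proofs are below) =====
def Claim_equal_pick_primary_metric_column_py : Prop :=
  ∀ (columns : List String), Dom_pick_primary_metric_column_py columns →
    Pre_pick_primary_metric_column_py columns →
    Spec_pick_primary_metric_column_py columns (pick_primary_metric_column_py columns)

-- ===== LEMMAS AND PROOFS =====

-- the four preferred names
def pvN0 : String := "NDCG@10 Mean"
def pvN1 : String := "F1 Mean"
def pvN2 : String := "Overall Exact Match Mean"
def pvN3 : String := "MAE Mean"

-- the rank used by B's min key, as a plain if-chain
def pvKf (c : String) : Int :=
  if c = pvN0 then 0 else if c = pvN1 then 1 else if c = pvN2 then 2 else if c = pvN3 then 3 else 4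

-- A's whole preferred loop with fallback, as a function of the candidate list
def pvChoose (cand : List String) (d : String) : String :=
  if cand.contains pvN0 then pvN0 else if cand.contains pvN1 then pvN1
  else if cand.contains pvN2 then pvN2 else if cand.contains pvN3 then pvN3 else d

-- B's stable-min fold once the accumulator is occupied
def pvF (b : String) (l : List String) : String :=
  l.foldl (fun m x => if pvKf x < pvKf m then x else m) b

theorem pvPriority_getD (c : String) :
    ((((PySem.Dict.empty.insert "NDCG@10 Mean" (0:Int)).insert "F1 Mean" 1).insert
        "Overall Exact Match Mean" 2).insert "MAE Mean" 3).getD c 4 = pvKf c := by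
  by_cases h0 : c = pvN0
  · subst h0; decide
  by_cases h1 : c = pvN1
  · subst h1; decide
  by_cases h2 : c = pvN2
  · subst h2; decide
  by_cases h3 : c = pvN3
  · subst h3; decide
  have hcon : ((((PySem.Dict.empty.insert "NDCG@10 Mean" (0:Int)).insert "F1 Mean" 1).insert
      "Overall Exact Match Mean" 2).insert "MAE Mean" 3).contains c = false := by
    simp only [pvN0, pvN1, pvN2, pvN3] at h0 h1 h2 h3
    simp [PySem.Dict.contains_insert, PySem.Dict.contains_empty, h0, h1, h2, h3]
  rw [PySem.Dict.getD_of_not_contains _ _ hcon]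
  simp [pvKf, h0, h1, h2, h3]

theorem pvLoopA_eq (cand : List String) (d : String) :
    (pickLoopA ["NDCG@10 Mean", "F1 Mean", "Overall Exact Match Mean", "MAE Mean"] cand).getD d
      = pvChoose cand d := by
  simp only [pickLoopA, pvChoose, pvN0, pvN1, pvN2, pvN3]
  split_ifs <;> simp_all

theorem pvMin?_cons (b : String) (l : List String) (key : String → Int) :
    PySem.List.min? (b :: l) key
      = some (l.foldl (fun m x => if key x < key m then x else m) b) := by
  simp only [PySem.List.min?, List.foldl_cons]
  induction l generalizing b with
  | nil => rfl
  | cons c l ih =>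
    simp only [List.foldl_cons]
    by_cases h : key c < key b <;> simp [h, ih]

theorem pvStep (b c : String) (l : List String) :
    pvChoose ((if pvKf c < pvKf b then c else b) :: l) (if pvKf c < pvKf b then c else b)
      = pvChoose (b :: c :: l) b := by
  by_cases h0 : b = pvN0 <;> by_cases h1 : b = pvN1 <;> by_cases h2 : b = pvN2 <;>
    by_cases h3 : b = pvN3 <;> by_cases g0 : c = pvN0 <;> by_cases g1 : c = pvN1 <;>
    by_cases g2 : c = pvN2 <;> by_cases g3 : c = pvN3 <;>
  simp_all [pvChoose, pvKf, pvN0, pvN1, pvN2, pvN3, eq_comm]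

theorem pvMain (l : List String) (b : String) : pvF b l = pvChoose (b :: l) b := by
  induction l generalizing b with
  | nil =>
    by_cases h0 : b = pvN0 <;> by_cases h1 : b = pvN1 <;> by_cases h2 : b = pvN2 <;>
      by_cases h3 : b = pvN3 <;> simp_all [pvF, pvChoose]
  | cons c l ih =>
    have : pvF b (c :: l) = pvF (if pvKf c < pvKf b then c else b) l := by
      simp [pvF]
    rw [this, ih, pvStep]

-- ===== VERDICT (by name: the statement is the Claim_ definition above) =====
theorem pick_primary_metric_column_py_spec : Claim_equal_pick_primary_metric_column_py := by
  intro columns _ hpre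
  unfold Spec_pick_primary_metric_column_py
  unfold pick_primary_metric_column_py pick_primary_metric_column_py_alt
  unfold Pre_pick_primary_metric_column_py at hpre
  cases hc : columns.filter (fun c => PySem.Str.endswith c " Mean") with
  | nil => exact absurd hc hpre
  | cons c0 rest =>
    simp only [List.length_cons, List.length_nil]
    rw [pvLoopA_eq, pvMin?_cons, Option.getD_some, ← pvMain rest c0]
    unfold pvF
    apply PySem.List.foldl_congr_mem
    intro acc x _
    norm_num [pvPriority_getD]
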